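-- pv_equiv track=rewrite | github.com/Schlechtwetterfront/xsizetools | Application/Core/zetexport.py | flags_from_int
-- ===== SOURCE A (Python) =====
-- def flags_from_int(val):
--     '''Unpacks an int indicating the material flags into the
--     single flags.'''
--     # Decodes an int into flags.
--     place0 = val
--     flags = [('specular', True, 128),
--              ('additive', True, 64),
--              ('perpixel', True, 32),
--              ('hard', True, 16),
--              ('double', True, 8),
--              ('single', True, 4),
--              ('glow', True, 2),
--              ('emissive', True, 1)]
--     new = place0
--     for index, flag in enumerate(flags):
--         new -= flag[2]
--         if new < 0:
--             flags[index] = flag[0], False, flag[2]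
--             new += flag[2]
--     return flags
-- ===== SOURCE B (Python) =====
-- def flags_from_int(val):
--     '''Unpacks an int indicating the material flags into the
--     single flags.'''
--     c = max(0, min(val, 255))
--     names = ['specular', 'additive', 'perpixel', 'hard',
--              'double', 'single', 'glow', 'emissive']
--     return [(name, bool(c & (128 >> i)), 128 >> i)
--             for i, name in enumerate(names)]
-- ===== Notes on version B (the rewrite author's own statement) =====
-- stated objective: simpler
-- what changed: Replaces A's sequential subtract-and-restore accumulator loop over the flag list with eight independent bit tests (c & bit) on the value clamped to 0..255 via a single comprehension.
import Mathlib
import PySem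

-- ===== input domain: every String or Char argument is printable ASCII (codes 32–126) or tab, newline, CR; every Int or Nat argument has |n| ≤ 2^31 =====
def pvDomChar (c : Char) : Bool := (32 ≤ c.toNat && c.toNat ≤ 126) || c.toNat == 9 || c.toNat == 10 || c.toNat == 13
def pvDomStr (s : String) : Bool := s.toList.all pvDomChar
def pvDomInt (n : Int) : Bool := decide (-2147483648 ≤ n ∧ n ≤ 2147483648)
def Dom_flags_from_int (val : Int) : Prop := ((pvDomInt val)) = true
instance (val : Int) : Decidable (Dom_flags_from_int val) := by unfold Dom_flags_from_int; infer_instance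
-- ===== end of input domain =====

-- B replaces A's sequential subtract-and-restore accumulator with independent bit tests on a clamped value (objective: simpler).

-- ===== PORT A =====
-- greedy loop: subtract each flag's bit value; on underflow restore and mark the flag False
def aStep (st : List (String × Bool × Int) × Int) (flag : String × Bool × Int) :
    List (String × Bool × Int) × Int :=
  let new' := st.2 - flag.2.2
  if new' < 0 then (st.1 ++ [(flag.1, false, flag.2.2)], new' + flag.2.2)
  else (st.1 ++ [flag], new')

def flags_from_int (val : Int) : List (String × Bool × Int) :=
  let flags : List (String × Bool × Int) :=
    [("specular", true, 128), ("additive", true, 64), ("perpixel", true, 32),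
     ("hard", true, 16), ("double", true, 8), ("single", true, 4),
     ("glow", true, 2), ("emissive", true, 1)]
  let new := val
  (flags.foldl aStep ([], new)).1

-- ===== PORT B =====
-- clamp to 0..255, then eight independent bit tests
def flags_from_int_alt (val : Int) : List (String × Bool × Int) :=
  let c := max 0 (min val 255)
  let names : List String :=
    ["specular", "additive", "perpixel", "hard", "double", "single", "glow", "emissive"]
  names.zipIdx.map (fun (p : String × Nat) =>
    let bit : Int := ((128 >>> p.2 : Nat) : Int)
    (p.1, decide (PySem.Int.band c bit ≠ 0), bit))

-- ===== PRECONDITION & SPEC =====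
def Spec_flags_from_int (val : Int) (out : List (String × Bool × Int)) : Prop := out = flags_from_int_alt val
instance (val : Int) (out : List (String × Bool × Int)) : Decidable (Spec_flags_from_int val out) := by unfold Spec_flags_from_int; infer_instance

-- ===== CLAIM (what is proved, stated in full; the proofs are below) =====
def Claim_equal_flags_from_int : Prop := ∀ (val : Int), Dom_flags_from_int val → Spec_flags_from_int val (flags_from_int val)

-- ===== LEMMAS AND PROOFS =====
lemma foldl_aStep_neg (fs : List (String × Bool × Int)) (acc : List (String × Bool × Int))
    (v : Int) (hv : v < 0) (hb : ∀ f ∈ fs, 0 ≤ f.2.2) :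
    List.foldl aStep (acc, v) fs = (acc ++ fs.map (fun f => (f.1, false, f.2.2)), v) := by
  induction fs generalizing acc with
  | nil => simp
  | cons f fs ih =>
    have hf : 0 ≤ f.2.2 := hb f (by simp)
    have hstep : aStep (acc, v) f = (acc ++ [(f.1, false, f.2.2)], v) := by
      simp only [aStep]
      rw [if_pos (by omega)]
      congr 1
      omega
    rw [List.foldl_cons, hstep, ih _ (fun g hg => hb g (by simp [hg]))]
    simp

lemma foldl_aStep_ge (fs : List (String × Bool × Int)) (acc : List (String × Bool × Int))
    (v : Int) (hb : ∀ f ∈ fs, 0 ≤ f.2.2) (hv : (fs.map (fun f => f.2.2)).sum ≤ v) :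
    List.foldl aStep (acc, v) fs = (acc ++ fs, v - (fs.map (fun f => f.2.2)).sum) := by
  induction fs generalizing acc v with
  | nil => simp
  | cons f fs ih =>
    have hsum : 0 ≤ (fs.map (fun f => f.2.2)).sum := by
      apply List.sum_nonneg
      intro x hx
      obtain ⟨g, hg, rfl⟩ := List.mem_map.mp hx
      exact hb g (by simp [hg])
    have hstep : aStep (acc, v) f = (acc ++ [f], v - f.2.2) := by
      simp only [aStep]
      rw [if_neg (by simp at hv; omega)]
    rw [List.foldl_cons, hstep, ih _ _ (fun g hg => hb g (by simp [hg])) (by simp at hv ⊢; omega)]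
    simp
    omega

set_option maxRecDepth 100000 in
lemma flags_mid : ∀ n ∈ List.range 256, flags_from_int (n : Int) = flags_from_int_alt (n : Int) := by
  decide

lemma flags_neg (val : Int) (h : val < 0) : flags_from_int val = flags_from_int_alt val := by
  have hc : max 0 (min val 255) = (0 : Int) := by omega
  simp only [flags_from_int, flags_from_int_alt, hc]
  rw [foldl_aStep_neg _ _ _ h (by decide)]
  rfl

lemma flags_big (val : Int) (h : 256 ≤ val) : flags_from_int val = flags_from_int_alt val := by
  have hc : max 0 (min val 255) = (255 : Int) := by omega
  simp only [flags_from_int, flags_from_int_alt, hc]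
  rw [foldl_aStep_ge _ _ _ (by decide) (by simp; omega)]
  rfl

-- ===== VERDICT (by name: the statement is the Claim_ definition above) =====
theorem flags_from_int_spec : Claim_equal_flags_from_int := by
  intro val _
  unfold Spec_flags_from_int
  by_cases h1 : val < 0
  · exact flags_neg val h1
  · by_cases h2 : 256 ≤ val
    · exact flags_big val h2
    · have hv : val = ((val.toNat : Nat) : Int) := by omega
      rw [hv]
      exact flags_mid val.toNat (List.mem_range.mpr (by omega))
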